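-- pv_equiv track=rewrite | github.com/ThomasOli/BioVision | scripts/normalize_session_landmark_indexing.py | _build_uniform_shift_mapping
-- ===== SOURCE A (Python) =====
-- from typing import Any, Dict, Iterable, List, Optional, Sequence, Tuple
--
-- def _build_uniform_shift_mapping(observed: Sequence[int], template: Sequence[int]) -> Optional[Dict[int, int]]:
--     if len(observed) != len(template) or not observed:
--         return None
--     offset = template[0] - observed[0]
--     shifted = [value + offset for value in observed]
--     if shifted != list(template):
--         return None
--     return {value: value + offset for value in observed}
-- ===== SOURCE B (Python) =====
-- def _build_uniform_shift_mapping(observed, template):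
--     if len(observed) != len(template) or not observed:
--         return None
--     diffs = {t - o for o, t in zip(observed, template)}
--     if len(diffs) != 1:
--         return None
--     offset = diffs.pop()
--     return {v: v + offset for v in observed}
-- ===== Notes on version B (the rewrite author's own statement) =====
-- stated objective: alternative
-- what changed: Instead of anchoring an offset on the first pair and comparing a fully materialized shifted list against the template, B maintains a set of pairwise differences and tests its cardinality for uniqueness.
import Mathlib
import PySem

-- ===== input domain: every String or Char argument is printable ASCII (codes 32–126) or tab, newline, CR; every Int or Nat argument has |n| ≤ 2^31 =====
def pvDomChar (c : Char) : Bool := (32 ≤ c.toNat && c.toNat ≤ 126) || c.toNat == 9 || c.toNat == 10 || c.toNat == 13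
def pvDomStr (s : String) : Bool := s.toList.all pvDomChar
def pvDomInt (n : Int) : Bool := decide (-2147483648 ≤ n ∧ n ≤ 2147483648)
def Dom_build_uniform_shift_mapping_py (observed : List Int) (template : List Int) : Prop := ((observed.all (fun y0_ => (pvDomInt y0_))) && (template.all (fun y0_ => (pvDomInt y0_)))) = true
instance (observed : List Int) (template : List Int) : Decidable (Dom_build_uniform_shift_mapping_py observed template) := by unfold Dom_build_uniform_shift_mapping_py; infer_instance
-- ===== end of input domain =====

-- B replaces A's "rebuild the shifted list and compare it to the template" check by
-- maintaining a set of pairwise differences and testing its cardinality (alternative structure, same cost).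

-- ===== PORT A =====
def build_uniform_shift_mapping_py (observed : List Int) (template : List Int) : Option (List (Int × Int)) :=
  if observed.length ≠ template.length ∨ observed = [] then none
  else
    let offset := template.headD 0 - observed.headD 0   -- template[0] - observed[0]; both nonempty here
    let shifted := observed.map (fun value => value + offset)
    if shifted ≠ template then none
    else some ((observed.foldl (fun d value => d.insert value (value + offset)) (PySem.Dict.empty : PySem.Dict Int Int)).items)

-- ===== PORT B =====
def build_uniform_shift_mapping_py_alt (observed : List Int) (template : List Int) : Option (List (Int × Int)) :=
  if observed.length ≠ template.length ∨ observed = [] then none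
  else
    let diffs : PySem.Set Int := PySem.Set.ofList (List.zipWith (fun o t => t - o) observed template)
    if diffs.length ≠ 1 then none
    else
      let offset := diffs.headD 0   -- diffs.pop() on the singleton set
      some ((observed.foldl (fun d v => d.insert v (v + offset)) (PySem.Dict.empty : PySem.Dict Int Int)).items)

-- ===== PRECONDITION & SPEC =====
def Spec_build_uniform_shift_mapping_py (observed : List Int) (template : List Int) (out : Option (List (Int × Int))) : Prop := out = build_uniform_shift_mapping_py_alt observed template
instance (observed : List Int) (template : List Int) (out : Option (List (Int × Int))) : Decidable (Spec_build_uniform_shift_mapping_py observed template out) := by unfold Spec_build_uniform_shift_mapping_py; infer_instance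

-- ===== CLAIM (what is proved, stated in full; the proofs are below) =====
def Claim_equal_build_uniform_shift_mapping_py : Prop := ∀ (observed : List Int) (template : List Int), Dom_build_uniform_shift_mapping_py observed template → Spec_build_uniform_shift_mapping_py observed template (build_uniform_shift_mapping_py observed template)

-- ===== LEMMAS AND PROOFS =====

-- A's check "observed.map (·+d) = template" says exactly: every pairwise difference equals d.
lemma map_add_eq_iff_zip (o t : List Int) (d : Int) (h : o.length = t.length) :
    o.map (fun v => v + d) = t ↔ ∀ x ∈ List.zipWith (fun a b => b - a) o t, x = d := by
  induction o generalizing t with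
  | nil => cases t <;> simp_all
  | cons a o ih =>
    cases t with
    | nil => simp_all
    | cons b t =>
      simp only [List.map, List.zipWith, List.cons.injEq, List.mem_cons, List.length_cons,
        Nat.succ.injEq] at *
      rw [ih t h]
      constructor
      · rintro ⟨rfl, hrest⟩ x hx
        rcases hx with rfl | hx
        · omega
        · exact hrest x hx
      · intro H
        have h1 := H (b - a) (Or.inl rfl)
        exact ⟨by omega, fun x hx => H x (Or.inr hx)⟩

-- B's check: the difference set is a singleton iff every difference equals the first one.
lemma ofList_len_one_iff (x : Int) (xs : List Int) :
    (PySem.Set.ofList (x :: xs)).length = 1 ↔ ∀ y ∈ x :: xs, y = x := by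
  rw [PySem.Set.ofList_cons, List.length_cons]
  constructor
  · intro h y hy
    have hnil : (PySem.Set.ofList xs).discard x = [] :=
      List.length_eq_zero_iff.mp (by omega)
    rcases List.mem_cons.mp hy with rfl | hy
    · rfl
    · by_contra hne
      have hmem : y ∈ (PySem.Set.ofList xs).discard x :=
        (PySem.Set.mem_discard _ _ _).2 ⟨(PySem.Set.mem_ofList _ _).2 hy, hne⟩
      simp [hnil] at hmem
  · intro h
    have hnil : (PySem.Set.ofList xs).discard x = [] := by
      rw [List.eq_nil_iff_forall_not_mem]
      intro y hy
      rw [PySem.Set.mem_discard, PySem.Set.mem_ofList] at hy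
      exact hy.2 (h y (List.mem_cons_of_mem _ hy.1))
    simp [hnil]

-- ===== VERDICT (by name: the statement is the Claim_ definition above) =====
theorem build_uniform_shift_mapping_py_spec : Claim_equal_build_uniform_shift_mapping_py := by
  intro observed template _
  unfold Spec_build_uniform_shift_mapping_py build_uniform_shift_mapping_py build_uniform_shift_mapping_py_alt
  by_cases hg : observed.length ≠ template.length ∨ observed = []
  · simp [hg]
  · simp only [hg, if_false]
    push Not at hg
    obtain ⟨hlen, hne⟩ := hg
    cases observed with
    | nil => exact absurd rfl hne
    | cons a o =>
      cases template with
      | nil => simp at hlen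
      | cons b t =>
        have hz : List.zipWith (fun x y => y - x) (a :: o) (b :: t) = (b - a) :: List.zipWith (fun x y => y - x) o t := rfl
        have hmap := map_add_eq_iff_zip (a :: o) (b :: t) (b - a) hlen
        have hone := ofList_len_one_iff (b - a) (List.zipWith (fun x y => y - x) o t)
        have hhd : (List.head? (PySem.Set.ofList ((b - a) :: List.zipWith (fun x y => y - x) o t))).getD 0 = b - a := by
          rw [PySem.Set.ofList_cons]; rfl
        by_cases hc : (a :: o).map (fun v => v + (b - a)) = b :: t
        · have hall := hmap.mp hc
          rw [hz] at hall
          have h1 : (PySem.Set.ofList ((b - a) :: List.zipWith (fun x y => y - x) o t)).length = 1 :=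
            hone.mpr hall
          simp [hc, h1, hhd]
        · have h1 : ¬ (PySem.Set.ofList ((b - a) :: List.zipWith (fun x y => y - x) o t)).length = 1 := by
            intro h1
            exact hc (hmap.mpr (by rw [hz]; exact hone.mp h1))
          have hc' : ¬ List.map (fun value => value + (b - a)) o = t := by
            intro h
            exact hc (by simp [h])
          simp [hc', h1]
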